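-- pv_equiv track=rewrite | github.com/Sistemas-Inteligentes-2021/Practica_5 | Tests/test_min_max_cutoff.py | veriy_rows
-- ===== SOURCE A (Python) =====
-- def veriy_rows(state,actions,size):
--     #rows
--     x_counter=0
--     o_counter=0
--     for i in range(actions):
--         #verify the jump of row
--         if i % size ==0:
--             x_counter=0
--             o_counter=0
--         if state[i]=='X':
--             x_counter+=1
--         elif state[i]=='O':
--             o_counter+=1
--         if x_counter==size:
--             return 1
--         if o_counter==size:
--             return -1
--     return None
-- ===== SOURCE B (Python) =====
-- def veriy_rows(state, actions, size):
--     if actions <= 0: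
--         return None
--     n = actions // size  # raises ZeroDivisionError for size == 0, as A does
--     for r in range(n):
--         row = state[r * size:(r + 1) * size]
--         if all(c == 'X' for c in row):
--             return 1
--         if all(c == 'O' for c in row):
--             return -1
--     return None
-- ===== Notes on version B (the rewrite author's own statement) =====
-- stated objective: simpler
-- what changed: Replaces A's flat index loop with running X/O counters reset at i % size == 0 by an outer loop over the actions//size complete rows, slicing each row and testing it with all(); the partial trailing row (which can never decide) is never scanned.
-- outside the precondition, e.g. on veriy_rows(['X'], 5, 1): A returns 1, B returns 1
import Mathlib
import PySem

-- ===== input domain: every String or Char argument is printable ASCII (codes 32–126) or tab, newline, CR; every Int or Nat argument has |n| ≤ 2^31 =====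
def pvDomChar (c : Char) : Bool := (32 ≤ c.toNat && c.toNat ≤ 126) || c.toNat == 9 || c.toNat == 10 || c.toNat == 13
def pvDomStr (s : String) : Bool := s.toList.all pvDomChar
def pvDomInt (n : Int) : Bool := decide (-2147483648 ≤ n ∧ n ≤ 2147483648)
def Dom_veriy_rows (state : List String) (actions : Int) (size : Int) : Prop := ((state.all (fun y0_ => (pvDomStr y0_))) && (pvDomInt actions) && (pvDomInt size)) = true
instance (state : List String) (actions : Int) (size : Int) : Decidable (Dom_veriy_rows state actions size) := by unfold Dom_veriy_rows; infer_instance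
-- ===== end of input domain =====

-- B replaces A's flat single pass with modular counter resets by an outer loop over
-- complete-row slices with an all-equal test per row (objective: simpler decomposition).


-- ===== PORT A =====
-- A's for-loop over range(actions): counters x_counter/o_counter reset when i % size == 0;
-- state[i] is pyGet? (none = IndexError, excluded by Pre_; the port returns none there).
def veriy_rows_go (state : List String) (size : Int) : List Int → Int → Int → Option Int
  | [], _, _ => none
  | i :: rest, x, o =>
    let x0 := if PySem.Int.mod i size = 0 then 0 else x
    let o0 := if PySem.Int.mod i size = 0 then 0 else o
    match PySem.List.pyGet? state i with
    | none => none
    | some s =>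
      let x1 := if s = "X" then x0 + 1 else x0
      let o1 := if s ≠ "X" ∧ s = "O" then o0 + 1 else o0
      if x1 = size then some 1
      else if o1 = size then some (-1)
      else veriy_rows_go state size rest x1 o1

def veriy_rows (state : List String) (actions : Int) (size : Int) : Option Int :=
  veriy_rows_go state size (PySem.List.pyRange 0 actions 1) 0 0

-- ===== PORT B =====
-- B: early None for actions <= 0; n = actions // size; for each row r, slice and all-equal test.
def veriy_rows_alt_go (state : List String) (size : Int) : List Int → Option Int
  | [] => none
  | r :: rest =>
    let row := PySem.List.slice state (some (r * size)) (some ((r + 1) * size))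
    if row.all (· == "X") then some 1
    else if row.all (· == "O") then some (-1)
    else veriy_rows_alt_go state size rest

def veriy_rows_alt (state : List String) (actions : Int) (size : Int) : Option Int :=
  if actions ≤ 0 then none
  else veriy_rows_alt_go state size (PySem.List.pyRange 0 (PySem.Int.floordiv actions size) 1)

-- ===== PRECONDITION & SPEC =====
-- Pre_ excludes the inputs where A raises: size == 0 with actions > 0 (ZeroDivisionError at
-- i % size; B's // raises there too) and actions > len(state) (IndexError — except on a few such
-- inputs where A decides and returns early before the out-of-range access; there B agrees, see cites).
def Pre_veriy_rows (state : List String) (actions : Int) (size : Int) : Prop :=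
  0 < actions → (actions ≤ (state.length : Int) ∧ size ≠ 0)
instance (state : List String) (actions : Int) (size : Int) : Decidable (Pre_veriy_rows state actions size) := by unfold Pre_veriy_rows; infer_instance
def pvWitness_veriy_rows : List String × Int × Int := (["X", "O", "O", "O"], 4, 2)

def Spec_veriy_rows (state : List String) (actions : Int) (size : Int) (out : Option Int) : Prop := out = veriy_rows_alt state actions size
instance (state : List String) (actions : Int) (size : Int) (out : Option Int) : Decidable (Spec_veriy_rows state actions size out) := by unfold Spec_veriy_rows; infer_instance

-- ===== CLAIM (what is proved, stated in full; the proofs are below) =====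
def Claim_equal_veriy_rows : Prop := ∀ (state : List String) (actions : Int) (size : Int), Dom_veriy_rows state actions size → Pre_veriy_rows state actions size → Spec_veriy_rows state actions size (veriy_rows state actions size)

-- ===== LEMMAS AND PROOFS =====

-- proof-side helpers: X/O counts of a scanned prefix
def cntX (l : List String) : Int := (l.countP (· == "X") : Int)
def cntO (l : List String) : Int := (l.countP (· == "O") : Int)

-- A's loop rephrased over the plain cell list, with the position-in-row j as a Nat
def go2 (size : Int) : List String → Nat → Int → Int → Option Int
  | [], _, _, _ => none
  | s :: cs, j, x, o =>
    let x0 := if j = 0 then 0 else x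
    let o0 := if j = 0 then 0 else o
    let x1 := if s = "X" then x0 + 1 else x0
    let o1 := if s ≠ "X" ∧ s = "O" then o0 + 1 else o0
    if x1 = size then some 1
    else if o1 = size then some (-1)
    else go2 size cs (if j + 1 = size.toNat then 0 else j + 1) x1 o1

-- B's row loop rephrased as a chunked scan over the cell list
def rowScan (sz : Nat) (h : 0 < sz) (cells : List String) : Option Int :=
  if hlen : cells.length < sz then none
  else if (cells.take sz).all (· == "X") then some 1
  else if (cells.take sz).all (· == "O") then some (-1)
  else rowScan sz h (cells.drop sz)
  termination_by cells.length
  decreasing_by simp only [List.length_drop]; omega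

theorem go2_zero_irrel (size : Int) (cs : List String) (x o x' o' : Int) :
    go2 size cs 0 x o = go2 size cs 0 x' o' := by
  cases cs <;> simp [go2]

theorem cntX_le (l : List String) : cntX l ≤ (l.length : Int) := by
  simpa [cntX] using Int.ofNat_le.mpr (List.countP_le_length (l := l) (p := (· == "X")))

theorem cntO_le (l : List String) : cntO l ≤ (l.length : Int) := by
  simpa [cntO] using Int.ofNat_le.mpr (List.countP_le_length (l := l) (p := (· == "O")))

theorem cntX_eq_iff (l : List String) :
    cntX l = (l.length : Int) ↔ l.all (· == "X") = true := by
  rw [cntX, Int.ofNat_inj, List.countP_eq_length, List.all_eq_true]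

theorem cntO_eq_iff (l : List String) :
    cntO l = (l.length : Int) ↔ l.all (· == "O") = true := by
  rw [cntO, Int.ofNat_inj, List.countP_eq_length, List.all_eq_true]

theorem cntX_snoc (l : List String) (s : String) :
    cntX (l ++ [s]) = if s = "X" then cntX l + 1 else cntX l := by
  simp only [cntX, List.countP_append, List.countP_cons, List.countP_nil]
  by_cases h : s = "X" <;> simp [h]

theorem cntO_snoc (l : List String) (s : String) :
    cntO (l ++ [s]) = if s ≠ "X" ∧ s = "O" then cntO l + 1 else cntO l := by
  have hXO : (s ≠ "X" ∧ s = "O") ↔ s = "O" := by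
    constructor
    · exact fun h => h.2
    · intro h; exact ⟨by simp [h], h⟩
  simp only [cntO, List.countP_append, List.countP_cons, List.countP_nil, hXO]
  by_cases h : s = "O" <;> simp [h]

theorem cnt_prefix_if (pre : List String) :
    ((if pre.length = 0 then (0:Int) else cntX pre) = cntX pre) ∧
    ((if pre.length = 0 then (0:Int) else cntO pre) = cntO pre) := by
  cases pre <;> simp [cntX, cntO]

theorem scan_row (size : Int) (hs : 0 < size) :
    ∀ (row : List String), row ≠ [] → ∀ (pre rest : List String),
    pre.length + row.length = size.toNat →
    go2 size (row ++ rest) pre.length (cntX pre) (cntO pre) =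
      (if (pre ++ row).all (· == "X") then some 1
       else if (pre ++ row).all (· == "O") then some (-1)
       else go2 size rest 0 0 0) := by
  intro row
  induction row with
  | nil => intro h; exact absurd rfl h
  | cons s row' ih =>
    intro _ pre rest hlen
    have hx0 := (cnt_prefix_if pre).1
    have ho0 := (cnt_prefix_if pre).2
    have hx1 : (if s = "X" then cntX pre + 1 else cntX pre) = cntX (pre ++ [s]) :=
      (cntX_snoc pre s).symm
    have ho1 : (if s ≠ "X" ∧ s = "O" then cntO pre + 1 else cntO pre) = cntO (pre ++ [s]) :=
      (cntO_snoc pre s).symm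
    show go2 size (s :: (row' ++ rest)) pre.length (cntX pre) (cntO pre) = _
    rw [go2]
    simp only [hx0, ho0, hx1, ho1]
    rcases eq_or_ne row' [] with hrow' | hrow'
    · -- last cell of the row
      subst hrow'
      have hlen1 : pre.length + 1 = size.toNat := by simpa using hlen
      have hlenq : ((pre ++ [s]).length : Int) = size := by
        simp [List.length_append]; omega
      by_cases hX : cntX (pre ++ [s]) = size
      · have hall : (pre ++ [s]).all (· == "X") = true :=
          (cntX_eq_iff _).mp (by rw [hX, hlenq])
        simp only [hX, if_pos rfl, List.append_nil, hall, if_pos]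
      · have hallX : (pre ++ [s]).all (· == "X") ≠ true := fun hall => by
          have := (cntX_eq_iff (pre ++ [s])).mpr hall
          exact hX (by rw [this, hlenq])
        by_cases hO : cntO (pre ++ [s]) = size
        · have hall : (pre ++ [s]).all (· == "O") = true :=
            (cntO_eq_iff _).mp (by rw [hO, hlenq])
          simp only [hX, if_neg hX, hO, if_pos rfl, List.append_nil, hall, if_pos,
            Bool.not_eq_true, hallX, if_neg]
          simp [hallX, hall]
        · have hallO : (pre ++ [s]).all (· == "O") ≠ true := fun hall => by
            have := (cntO_eq_iff (pre ++ [s])).mpr hall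
            exact hO (by rw [this, hlenq])
          have hj : (if pre.length + 1 = size.toNat then 0 else pre.length + 1) = 0 :=
            if_pos hlen1
          rw [if_neg hX, if_neg hO, hj]
          simp only [List.append_nil, hallX, hallO]
          simp only [Bool.not_eq_true] at hallX hallO
          rw [if_neg (by simp [hallX]), if_neg (by simp [hallO])]
          exact go2_zero_irrel size rest (cntX (pre ++ [s])) (cntO (pre ++ [s])) 0 0
    · -- middle of the row
      have hne : row'.length ≠ 0 := by simpa using hrow'
      have hmid : pre.length + 1 < size.toNat := by simp at hlen; omega
      have hX : cntX (pre ++ [s]) ≠ size := by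
        have h1 := cntX_le (pre ++ [s])
        simp [List.length_append] at h1
        omega
      have hO : cntO (pre ++ [s]) ≠ size := by
        have h1 := cntO_le (pre ++ [s])
        simp [List.length_append] at h1
        omega
      have hj : (if pre.length + 1 = size.toNat then 0 else pre.length + 1)
          = (pre ++ [s]).length := by
        rw [if_neg (by omega)]; simp
      rw [if_neg hX, if_neg hO, hj]
      have hres := ih hrow' (pre ++ [s]) rest (by simp at hlen ⊢; omega)
      rw [hres]
      simp [List.append_assoc]

theorem scan_partial (size : Int) (hs : 0 < size) :
    ∀ (row pre : List String), pre.length + row.length < size.toNat →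
    go2 size row pre.length (cntX pre) (cntO pre) = none := by
  intro row
  induction row with
  | nil => intro pre _; rfl
  | cons s row' ih =>
    intro pre hlen
    have hx0 := (cnt_prefix_if pre).1
    have ho0 := (cnt_prefix_if pre).2
    have hx1 : (if s = "X" then cntX pre + 1 else cntX pre) = cntX (pre ++ [s]) :=
      (cntX_snoc pre s).symm
    have ho1 : (if s ≠ "X" ∧ s = "O" then cntO pre + 1 else cntO pre) = cntO (pre ++ [s]) :=
      (cntO_snoc pre s).symm
    rw [go2]
    simp only [hx0, ho0, hx1, ho1]
    have hX : cntX (pre ++ [s]) ≠ size := by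
      have h1 := cntX_le (pre ++ [s])
      simp [List.length_append] at h1
      simp at hlen
      omega
    have hO : cntO (pre ++ [s]) ≠ size := by
      have h1 := cntO_le (pre ++ [s])
      simp [List.length_append] at h1
      simp at hlen
      omega
    have hj : (if pre.length + 1 = size.toNat then 0 else pre.length + 1)
        = (pre ++ [s]).length := by
      rw [if_neg (by simp at hlen; omega)]; simp
    rw [if_neg hX, if_neg hO, hj]
    exact ih (pre ++ [s]) (by simp at hlen ⊢; omega)

theorem go2_eq_rowScan_aux (size : Int) (hs : 0 < size) :
    ∀ (N : Nat) (cells : List String), cells.length ≤ N →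
    go2 size cells 0 0 0 = rowScan size.toNat (by omega) cells := by
  intro N
  induction N with
  | zero =>
    intro cells hc
    have : cells = [] := List.eq_nil_of_length_eq_zero (by omega)
    subst this
    rw [rowScan]
    simp [go2]
    omega
  | succ N ih =>
    intro cells hc
    by_cases hlen : cells.length < size.toNat
    · rw [rowScan, dif_pos hlen]
      have := scan_partial size hs cells [] (by simpa using hlen)
      simpa [cntX, cntO] using this
    · have hsz : 0 < size.toNat := by omega
      have hrowlen : (cells.take size.toNat).length = size.toNat := by
        simp; omega
      have hsplit : cells = cells.take size.toNat ++ cells.drop size.toNat :=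
        (List.take_append_drop _ _).symm
      have hrow_ne : cells.take size.toNat ≠ [] := by
        intro h; rw [h] at hrowlen; simp at hrowlen; omega
      have h1 := scan_row size hs (cells.take size.toNat) hrow_ne []
        (cells.drop size.toNat) (by simpa using hrowlen)
      have h2 : go2 size cells 0 0 0 = go2 size
          (cells.take size.toNat ++ cells.drop size.toNat) 0 (cntX []) (cntO []) := by
        rw [← hsplit]; simp [cntX, cntO]
      simp only [List.length_nil, List.nil_append] at h1
      have hih := ih (cells.drop size.toNat) (by simp; omega)
      rw [h2, h1, hih]
      conv_rhs => rw [rowScan]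
      rw [dif_neg hlen]
      rfl

theorem go2_eq_rowScan (size : Int) (hs : 0 < size) (cells : List String) :
    go2 size cells 0 0 0 = rowScan size.toNat (by omega) cells :=
  go2_eq_rowScan_aux size hs cells.length cells le_rfl

theorem modstep (size i : Int) (hs : 0 < size) :
    PySem.Int.mod (i + 1) size =
      if PySem.Int.mod i size + 1 = size then 0 else PySem.Int.mod i size + 1 := by
  rw [PySem.Int.mod_eq_emod_of_pos hs, PySem.Int.mod_eq_emod_of_pos hs]
  have h0 : 0 ≤ i % size := Int.emod_nonneg i (by omega)
  have h1 : i % size < size := Int.emod_lt_of_pos i hs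
  have e := Int.ediv_add_emod i size
  by_cases hc : i % size + 1 = size
  · have hval : i + 1 = size * (i / size + 1) := by
      rw [mul_add, mul_one]; linarith
    rw [if_pos hc, hval, Int.mul_emod_right]
  · have hval : (i + 1) % size = (i % size + 1) % size := by
      conv_lhs => rw [show i + 1 = i % size + 1 + size * (i / size) from by linarith]
      rw [Int.add_mul_emod_self_left]
    rw [hval, Int.emod_eq_of_lt (by omega) (by omega), if_neg hc]

theorem goA_reindex (state : List String) (size actions : Int) (hs : 0 < size)
    (hal : actions ≤ (state.length : Int)) :
    ∀ (k : Nat) (i : Int), 0 ≤ i → (actions - i).toNat = k → ∀ x o,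
    veriy_rows_go state size (PySem.List.pyRange i actions 1) x o =
      go2 size ((state.take actions.toNat).drop i.toNat) (PySem.Int.mod i size).toNat x o := by
  intro k
  induction k with
  | zero =>
    intro i hi hk x o
    have hge : actions ≤ i := by omega
    rw [PySem.List.pyRange_one_eq_nil hge]
    have : (state.take actions.toNat).drop i.toNat = [] :=
      List.drop_eq_nil_of_le (by simp; omega)
    rw [this]
    rfl
  | succ k ih =>
    intro i hi hk x o
    have hlt : i < actions := by omega
    have hsome : PySem.List.pyGet? state i = some state[i.toNat] :=
      PySem.List.pyGet?_eq_some_getElem state hi (by omega)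
    have hdrop : (state.take actions.toNat).drop i.toNat =
        state[i.toNat] :: (state.take actions.toNat).drop (i.toNat + 1) := by
      rw [List.drop_eq_getElem_cons (by simp; omega)]
      congr 1
      exact List.getElem_take
    rw [PySem.List.pyRange_one_cons hlt, hdrop]
    simp only [veriy_rows_go, go2, hsome]
    have hmnn : 0 ≤ PySem.Int.mod i size := PySem.Int.mod_nonneg i hs
    simp only [show ((PySem.Int.mod i size).toNat = 0) ↔ (PySem.Int.mod i size = 0) from
      by omega]
    apply if_congr Iff.rfl rfl
    apply if_congr Iff.rfl rfl
    have hmlt : PySem.Int.mod i size < size := PySem.Int.mod_lt i hs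
    have hm := modstep size i hs
    have hj : (if (PySem.Int.mod i size).toNat + 1 = size.toNat then 0
        else (PySem.Int.mod i size).toNat + 1) = (PySem.Int.mod (i + 1) size).toNat := by
      by_cases hcc : PySem.Int.mod i size + 1 = size
      · rw [hm, if_pos hcc, if_pos (by omega)]
        rfl
      · rw [hm, if_neg hcc, if_neg (by omega)]
        omega
    rw [hj, show i.toNat + 1 = (i + 1).toNat from by omega]
    exact ih (i + 1) (by omega) (by omega) _ _

theorem goB_reindex (state : List String) (size actions : Int) (hs : 0 < size)
    (ha : 0 < actions) (hal : actions ≤ (state.length : Int)) :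
    ∀ (k : Nat) (r : Nat), (r : Int) ≤ PySem.Int.floordiv actions size →
    ((PySem.Int.floordiv actions size).toNat - r) = k →
    veriy_rows_alt_go state size
        (PySem.List.pyRange r (PySem.Int.floordiv actions size) 1) =
      rowScan size.toNat (by omega)
        ((state.take actions.toNat).drop (r * size.toNat)) := by
  have hn := (PySem.Int.floordiv_eq_iff_of_pos (a := actions) (b := size)
    (q := PySem.Int.floordiv actions size) hs).mp rfl
  have hn0 : 0 ≤ PySem.Int.floordiv actions size := by
    by_contra hc
    have h1 : (PySem.Int.floordiv actions size + 1) * size ≤ 0 := by nlinarith [hn.1, hn.2]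
    omega
  have hszc : ((size.toNat : Nat) : Int) = size := Int.toNat_of_nonneg hs.le
  have hnnc : (((PySem.Int.floordiv actions size).toNat : Nat) : Int) =
      PySem.Int.floordiv actions size := Int.toNat_of_nonneg hn0
  have hlen2 : actions.toNat ≤ state.length := by omega
  have hlowN : (PySem.Int.floordiv actions size).toNat * size.toNat ≤ actions.toNat := by
    have hcast : (((PySem.Int.floordiv actions size).toNat * size.toNat : Nat) : Int) =
        PySem.Int.floordiv actions size * size := by push_cast [hszc, hnnc]; ring
    omega
  have hhighN : actions.toNat < ((PySem.Int.floordiv actions size).toNat + 1) * size.toNat := by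
    have hcast : ((((PySem.Int.floordiv actions size).toNat + 1) * size.toNat : Nat) : Int) =
        (PySem.Int.floordiv actions size + 1) * size := by push_cast [hszc, hnnc]; ring
    omega
  intro k
  induction k with
  | zero =>
    intro r hr hk
    have hrn : r = (PySem.Int.floordiv actions size).toNat := by omega
    subst hrn
    rw [PySem.List.pyRange_one_eq_nil (by omega)]
    have hexp : ((PySem.Int.floordiv actions size).toNat + 1) * size.toNat =
        (PySem.Int.floordiv actions size).toNat * size.toNat + size.toNat := by ring
    have hlen : ((state.take actions.toNat).drop
        ((PySem.Int.floordiv actions size).toNat * size.toNat)).length < size.toNat := by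
      simp only [List.length_drop, List.length_take]
      omega
    rw [rowScan, dif_pos hlen]
    rfl
  | succ k ih =>
    intro r hr hk
    have hrlt : (r : Int) < PySem.Int.floordiv actions size := by omega
    have hr1 : r + 1 ≤ (PySem.Int.floordiv actions size).toNat := by omega
    rw [PySem.List.pyRange_one_cons hrlt]
    simp only [veriy_rows_alt_go]
    have hexp : (r + 1) * size.toNat = r * size.toNat + size.toNat := by ring
    -- the slice is the r-th chunk of `size` cells
    have e1 : (((r * size.toNat : Nat)) : Int) = (r : Int) * size := by push_cast [hszc]; ring
    have e2 : ((((r + 1) * size.toNat : Nat)) : Int) = ((r : Int) + 1) * size := by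
      push_cast [hszc]; ring
    have hslice : PySem.List.slice state (some ((r : Int) * size))
        (some (((r : Int) + 1) * size)) = (state.drop (r * size.toNat)).take size.toNat := by
      rw [← e1, ← e2, PySem.List.slice_natCast]
      congr 1
      omega
    rw [hslice]
    -- the r-th chunk is complete: (r+1) * size ≤ actions
    have hchunkN : (r + 1) * size.toNat ≤ actions.toNat := by
      have hstep : ((r : Int) + 1) * size ≤ PySem.Int.floordiv actions size * size :=
        mul_le_mul_of_nonneg_right (by omega) hs.le
      have hcast : (((PySem.Int.floordiv actions size).toNat * size.toNat : Nat) : Int) =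
          PySem.Int.floordiv actions size * size := by push_cast [hszc, hnnc]; ring
      omega
    have hlennot : ¬ ((state.take actions.toNat).drop (r * size.toNat)).length < size.toNat := by
      simp only [List.length_drop, List.length_take]
      omega
    rw [rowScan, dif_neg hlennot]
    -- the chunk rows coincide
    have hrows : ((state.take actions.toNat).drop (r * size.toNat)).take size.toNat
        = (state.drop (r * size.toNat)).take size.toNat := by
      rw [List.drop_take, List.take_take]
      congr 1
      omega
    rw [← hrows]
    -- and the recursive calls coincide
    have hdrop2 : ((state.take actions.toNat).drop (r * size.toNat)).drop size.toNat
        = (state.take actions.toNat).drop ((r + 1) * size.toNat) := by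
      rw [List.drop_drop]
      congr 1
      omega
    have hrec := ih (r + 1) (by push_cast; omega) (by omega)
    push_cast at hrec
    rw [hdrop2, ← hrec]

theorem goA_neg (state : List String) (size : Int) (hs : size < 0) :
    ∀ (l : List Int), (∀ i ∈ l, ∃ s, PySem.List.pyGet? state i = some s) →
    ∀ x o, 0 ≤ x → 0 ≤ o → veriy_rows_go state size l x o = none := by
  intro l
  induction l with
  | nil => intro _ x o _ _; rfl
  | cons i rest ih =>
    intro hget x o hx ho
    obtain ⟨s, hsome⟩ := hget i (by simp)
    have hXne : (if s = "X" then (if PySem.Int.mod i size = 0 then (0:Int) else x) + 1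
        else (if PySem.Int.mod i size = 0 then (0:Int) else x)) ≠ size := by
      split_ifs <;> omega
    have hOne : (if s ≠ "X" ∧ s = "O" then (if PySem.Int.mod i size = 0 then (0:Int) else o) + 1
        else (if PySem.Int.mod i size = 0 then (0:Int) else o)) ≠ size := by
      split_ifs <;> omega
    have hx1 : (0:Int) ≤ (if s = "X" then (if PySem.Int.mod i size = 0 then (0:Int) else x) + 1
        else (if PySem.Int.mod i size = 0 then (0:Int) else x)) := by
      split_ifs <;> omega
    have ho1 : (0:Int) ≤ (if s ≠ "X" ∧ s = "O" then (if PySem.Int.mod i size = 0 then (0:Int) else o) + 1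
        else (if PySem.Int.mod i size = 0 then (0:Int) else o)) := by
      split_ifs <;> omega
    simp only [veriy_rows_go, hsome]
    rw [if_neg hXne, if_neg hOne]
    exact ih (fun j hj => hget j (by simp [hj])) _ _ hx1 ho1

-- ===== VERDICT (by name: the statement is the Claim_ definition above) =====
theorem veriy_rows_spec : Claim_equal_veriy_rows := by
  intro state actions size _ hpre
  unfold Spec_veriy_rows veriy_rows veriy_rows_alt
  by_cases ha : actions ≤ 0
  · rw [if_pos ha, PySem.List.pyRange_one_eq_nil (by omega)]
    rfl
  · have ha' : 0 < actions := by omega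
    obtain ⟨hal, hsz⟩ := hpre ha'
    rw [if_neg (by omega)]
    rcases lt_or_gt_of_ne hsz with hneg | hpos
    · -- size < 0: A's counters never reach size; B's row count is negative
      have hA := goA_neg state size hneg (PySem.List.pyRange 0 actions 1)
        (fun i hi => by
          rw [PySem.List.mem_pyRange_one] at hi
          exact ⟨state[i.toNat], PySem.List.pyGet?_eq_some_getElem state hi.1 (by omega)⟩)
        0 0 le_rfl le_rfl
      rw [hA]
      have hfd := PySem.Int.floordiv_mul_add_mod actions size
      have hmb := PySem.Int.mod_neg_bounds (a := actions) (b := size) hneg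
      have hnlt : PySem.Int.floordiv actions size ≤ 0 := by
        by_contra hc
        have hc' : 0 < PySem.Int.floordiv actions size := by omega
        nlinarith [hfd, hmb.1, hmb.2]
      rw [PySem.List.pyRange_one_eq_nil (by omega)]
      rfl
    · -- size > 0: both sides equal the chunked row scan of the first `actions` cells
      have hA := goA_reindex state size actions hpos hal (actions - 0).toNat 0 le_rfl rfl 0 0
      have hmod0 : PySem.Int.mod 0 size = 0 := by
        rw [PySem.Int.mod_eq_emod_of_pos hpos]; simp
      rw [hA, hmod0]
      simp only [Int.toNat_zero, List.drop_zero]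
      rw [go2_eq_rowScan size hpos]
      have hn := (PySem.Int.floordiv_eq_iff_of_pos (a := actions) (b := size)
        (q := PySem.Int.floordiv actions size) hpos).mp rfl
      have hn0 : 0 ≤ PySem.Int.floordiv actions size := by
        by_contra hc
        have h1 : (PySem.Int.floordiv actions size + 1) * size ≤ 0 := by nlinarith [hn.1, hn.2]
        omega
      have hB := goB_reindex state size actions hpos ha' hal
        ((PySem.Int.floordiv actions size).toNat - 0) 0 (by omega) rfl
      simp only [Nat.cast_zero, Nat.zero_mul, List.drop_zero] at hB
      rw [hB]
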